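-- pv_equiv track=rewrite | github.com/bytecreeper/project-artemis | src/artemis/ai/investigator.py | _map_mitre
-- ===== SOURCE A (Python) =====
-- def _map_mitre(finding: dict, events: list[dict]) -> list[str]:
--     """Map finding and events to MITRE ATT&CK techniques."""
--     techniques = []
--
--     # From the finding itself
--     if finding.get("mitre_id"):
--         techniques.append(finding["mitre_id"])
--
--     # From event types
--     event_mitre_map = {
--         "edr.process.start": "T1059",       # Execution
--         "edr.process.suspicious": "T1059",
--         "edr.file.modified": "T1565",        # Data Manipulation
--         "edr.file.created": "T1105",         # Ingress Tool Transfer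
--         "edr.registry.change": "T1547",      # Boot/Logon Autostart
--         "correlation.chain": "T1078",        # Valid Accounts (multi-stage)
--         "network.host.new": "T1046",         # Network Service Discovery
--     }
--
--     for e in events:
--         t = event_mitre_map.get(e.get("type", ""))
--         if t and t not in techniques:
--             techniques.append(t)
--
--     return techniques
-- ===== SOURCE B (Python) =====
-- def _dedup(xs: list[str]) -> list[str]:
--     """Order-preserving dedup by recursion: keep the head, strip all its later
--     occurrences from the tail, recurse on what is left."""
--     if not xs:
--         return []
--     head = xs[0]
--     return [head] + _dedup([x for x in xs[1:] if x != head])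
--
--
-- def _map_mitre(finding: dict, events: list[dict]) -> list[str]:
--     """Map finding and events to MITRE ATT&CK techniques."""
--     event_mitre_map = {
--         "edr.process.start": "T1059",
--         "edr.process.suspicious": "T1059",
--         "edr.file.modified": "T1565",
--         "edr.file.created": "T1105",
--         "edr.registry.change": "T1547",
--         "correlation.chain": "T1078",
--         "network.host.new": "T1046",
--     }
--     tags = [t for t in [finding.get("mitre_id")]
--             + [event_mitre_map.get(e.get("type", "")) for e in events] if t]
--     return _dedup(tags)
-- ===== Notes on version B (the rewrite author's own statement) =====
-- stated objective: alternative
-- what changed: B first collects all candidate tags in one comprehension (finding id plus mapped event types, falsy values filtered), then deduplicates by a recursive filter-out pass (emit head, delete its later occurrences, recurse) instead of A's single loop that tests membership in the growing output list.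
import Mathlib
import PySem

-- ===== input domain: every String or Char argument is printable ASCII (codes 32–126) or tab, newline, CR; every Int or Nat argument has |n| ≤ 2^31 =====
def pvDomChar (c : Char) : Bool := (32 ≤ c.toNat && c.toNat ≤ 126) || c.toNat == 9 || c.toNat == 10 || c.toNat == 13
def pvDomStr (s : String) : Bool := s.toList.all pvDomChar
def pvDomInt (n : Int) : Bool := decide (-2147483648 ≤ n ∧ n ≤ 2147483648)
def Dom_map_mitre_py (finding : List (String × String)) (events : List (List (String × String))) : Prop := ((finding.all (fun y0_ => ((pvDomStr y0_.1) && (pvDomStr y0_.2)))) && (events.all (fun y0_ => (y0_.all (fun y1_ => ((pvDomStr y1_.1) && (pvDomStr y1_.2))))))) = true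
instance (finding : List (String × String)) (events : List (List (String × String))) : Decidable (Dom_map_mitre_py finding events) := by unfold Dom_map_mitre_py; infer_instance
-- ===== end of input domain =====

-- B collects all candidate tags in one comprehension and deduplicates them by a
-- recursive filter-out pass (emit head, delete its later occurrences, recurse),
-- replacing A's single loop that tests membership in the growing output (objective: alternative).


-- ===== PORT A =====
-- the event_mitre_map dict literal (shared data constant; each port uses it as its Python does)
def pvEventMitreMap : PySem.Dict String String :=
  PySem.Dict.ofList [("edr.process.start", "T1059"), ("edr.process.suspicious", "T1059"),
    ("edr.file.modified", "T1565"), ("edr.file.created", "T1105"),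
    ("edr.registry.change", "T1547"), ("correlation.chain", "T1078"),
    ("network.host.new", "T1046")]

def map_mitre_py (finding : List (String × String)) (events : List (List (String × String))) : List String :=
  -- if finding.get("mitre_id"): techniques.append(finding["mitre_id"])
  let techniques : List String :=
    match (PySem.Dict.mk finding).get? "mitre_id" with
    | some s => if s ≠ "" then [(PySem.Dict.mk finding).getD "mitre_id" ""] else []
    | none => []
  -- for e in events: t = event_mitre_map.get(e.get("type", "")); if t and t not in techniques: techniques.append(t)
  events.foldl (fun acc e =>
    match pvEventMitreMap.get? ((PySem.Dict.mk e).getD "type" "") with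
    | some t => if t ≠ "" ∧ t ∉ acc then acc ++ [t] else acc
    | none => acc) techniques

-- ===== PORT B =====
-- _dedup: keep the head, strip its later occurrences from the tail, recurse
def pvFilterDedup : List String → List String
  | [] => []
  | x :: xs => x :: pvFilterDedup (xs.filter (fun y => y ≠ x))
termination_by xs => xs.length
decreasing_by
  simp only [List.length_unattach, List.length_cons, Nat.lt_succ_iff]
  exact (List.length_filter_le _ _).trans (le_of_eq List.length_attach)

def map_mitre_py_alt (finding : List (String × String)) (events : List (List (String × String))) : List String :=
  -- tags = [t for t in [finding.get("mitre_id")] + [event_mitre_map.get(e.get("type","")) for e in events] if t]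
  let tags : List String :=
    (([(PySem.Dict.mk finding).get? "mitre_id"] ++
      events.map (fun e => pvEventMitreMap.get? ((PySem.Dict.mk e).getD "type" ""))).filterMap
      (fun t? => match t? with
        | some t => if t ≠ "" then some t else none
        | none => none))
  pvFilterDedup tags

-- ===== PRECONDITION & SPEC =====
def Spec_map_mitre_py (finding : List (String × String)) (events : List (List (String × String))) (out : List String) : Prop := out = map_mitre_py_alt finding events
instance (finding : List (String × String)) (events : List (List (String × String))) (out : List String) : Decidable (Spec_map_mitre_py finding events out) := by unfold Spec_map_mitre_py; infer_instance

-- ===== CLAIM (what is proved, stated in full; the proofs are below) =====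
def Claim_equal_map_mitre_py : Prop := ∀ (finding : List (String × String)) (events : List (List (String × String))), Dom_map_mitre_py finding events → Spec_map_mitre_py finding events (map_mitre_py finding events)

-- ===== LEMMAS AND PROOFS =====

-- equation lemmas for the well-founded _dedup recursion
theorem pvFilterDedup_nil : pvFilterDedup [] = [] := by
  rw [pvFilterDedup.eq_def]
theorem pvFilterDedup_cons (x : String) (xs : List String) :
    pvFilterDedup (x :: xs) = x :: pvFilterDedup (xs.filter (fun y => y ≠ x)) := by
  rw [pvFilterDedup.eq_def]

-- A's "append if absent" step written as PySem.Set.add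
theorem pv_add_step (acc : List String) (t : String) :
    (if t ∉ acc then acc ++ [t] else acc) = PySem.Set.add acc t := by
  by_cases hm : t ∈ acc <;> simp [PySem.Set.add, List.contains_eq_mem, hm]

-- membership-accumulating fold = filter-out recursion (relative to any accumulator)
theorem pv_foldl_add_eq_filterDedup_aux (n : Nat) :
    ∀ (xs acc : List String), xs.length ≤ n →
      xs.foldl PySem.Set.add acc = acc ++ pvFilterDedup (xs.filter (fun y => y ∉ acc)) := by
  induction n with
  | zero =>
    intro xs acc h
    have hx : xs = [] := List.eq_nil_of_length_eq_zero (Nat.le_zero.mp h)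
    subst hx
    simp [pvFilterDedup_nil]
  | succ n ih =>
    intro xs acc h
    cases xs with
    | nil => simp [pvFilterDedup_nil]
    | cons x xs =>
      have hlen : xs.length ≤ n := Nat.succ_le_succ_iff.mp h
      by_cases hx : x ∈ acc
      · have := ih xs acc hlen
        simp [List.foldl_cons, PySem.Set.add, List.contains_eq_mem, hx, this]
      · have hstep : PySem.Set.add acc x = acc ++ [x] := by
          simp [PySem.Set.add, List.contains_eq_mem, hx]
        have hIH := ih xs (acc ++ [x]) hlen
        have hfilter : xs.filter (fun y => decide (y ∉ acc ++ [x]))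
            = (xs.filter (fun y => y ∉ acc)).filter (fun y => y ≠ x) := by
          rw [List.filter_filter]
          apply List.filter_congr
          intro y _
          by_cases h1 : y ∈ acc <;> by_cases h2 : y = x <;> simp [h1, h2]
        rw [List.foldl_cons, hstep, hIH, hfilter]
        have hc : (x :: xs).filter (fun y => decide (y ∉ acc))
            = x :: xs.filter (fun y => decide (y ∉ acc)) := by simp [hx]
        rw [hc, pvFilterDedup_cons, List.append_assoc, List.singleton_append]

theorem pv_foldl_add_eq_filterDedup (xs acc : List String) :
    xs.foldl PySem.Set.add acc = acc ++ pvFilterDedup (xs.filter (fun y => y ∉ acc)) :=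
  pv_foldl_add_eq_filterDedup_aux xs.length xs acc le_rfl

-- A's event loop equals folding Set.add over the filtered candidates
theorem pv_loop_eq_dedupFold (events : List (List (String × String))) (acc : List String) :
    events.foldl (fun acc e =>
      match pvEventMitreMap.get? ((PySem.Dict.mk e).getD "type" "") with
      | some t => if t ≠ "" ∧ t ∉ acc then acc ++ [t] else acc
      | none => acc) acc
    = (events.map (fun e => pvEventMitreMap.get? ((PySem.Dict.mk e).getD "type" ""))
        |>.filterMap (fun t? =>
          match t? with
          | some t => if t ≠ "" then some t else none
          | none => none)).foldl PySem.Set.add acc := by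
  induction events generalizing acc with
  | nil => rfl
  | cons e es ih =>
    simp only [List.foldl_cons, List.map_cons, List.filterMap_cons]
    rcases h : pvEventMitreMap.get? ((PySem.Dict.mk e).getD "type" "") with _ | t
    · exact ih acc
    · by_cases ht : t = ""
      · subst ht; simpa using ih acc
      · have hstep : (if t ≠ "" ∧ t ∉ acc then acc ++ [t] else acc)
            = PySem.Set.add acc t := by
          rw [← pv_add_step]; by_cases hm : t ∈ acc <;> simp [ht, hm]
        dsimp only
        rw [hstep, if_pos ht, List.foldl_cons]
        exact ih _

-- ===== VERDICT (by name: the statement is the Claim_ definition above) =====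
theorem map_mitre_py_spec : Claim_equal_map_mitre_py := by
  intro finding events _
  unfold Spec_map_mitre_py map_mitre_py map_mitre_py_alt
  dsimp only
  rw [pv_loop_eq_dedupFold, List.filterMap_append, pv_foldl_add_eq_filterDedup]
  rcases h : (PySem.Dict.mk finding).get? "mitre_id" with _ | s
  · simp
  · by_cases hs : s = ""
    · subst hs; simp
    · have hg : (PySem.Dict.mk finding).getD "mitre_id" "" = s := by
        simp [PySem.Dict.getD, h]
      simp only [hg, List.filterMap_cons, List.filterMap_nil, if_pos hs]
      conv_rhs => rw [List.singleton_append, pvFilterDedup_cons]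
      rw [List.singleton_append]
      refine congrArg (fun l => s :: l) (congrArg pvFilterDedup (List.filter_congr ?_))
      intro y _
      simp
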